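-- pv_equiv track=rewrite | github.com/guywine/Puzzles | Josephus.py | get_diffs_of_each_round
-- ===== SOURCE A (Python) =====
-- def get_indices_of_firsts(players_list: list):
--     firsts_list = [0]
--     for i in range(1, len(players_list)):
--         if players_list[i] < players_list[i - 1]:
--             firsts_list.append(i)
--     return firsts_list
--
-- def get_diffs_of_each_round(players_list: list):
--     firsts_indices = get_indices_of_firsts(players_list)
--     diffs = [
--         players_list[firsts_indices[i] + 1] - players_list[firsts_indices[i]]
--         for i in range(len(firsts_indices))
--         if firsts_indices[i] + 1 < len(players_list)
--     ]
--     # last diff mught be negative since there are two 'firsts' in a row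
--     return diffs
-- ===== SOURCE B (Python) =====
-- def get_diffs_of_each_round(players_list: list):
--     # Work on the sequence of adjacent differences instead of the values:
--     # a round starts exactly after a negative difference (a drop), so the
--     # answer is the first difference plus every difference preceded by a
--     # negative one.
--     diffs = [b - a for a, b in zip(players_list, players_list[1:])]
--     return diffs[:1] + [d for prev_d, d in zip(diffs, diffs[1:]) if prev_d < 0]
-- ===== Notes on version B (the rewrite author's own statement) =====
-- stated objective: simpler
-- what changed: B never inspects the original values to detect round starts: it first builds the list of adjacent differences, then returns the first difference plus every difference whose predecessor difference is negative (a negative diff IS a round boundary), replacing A's index-table construction and index arithmetic by two comprehensions over the diff sequence.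
import Mathlib
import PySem

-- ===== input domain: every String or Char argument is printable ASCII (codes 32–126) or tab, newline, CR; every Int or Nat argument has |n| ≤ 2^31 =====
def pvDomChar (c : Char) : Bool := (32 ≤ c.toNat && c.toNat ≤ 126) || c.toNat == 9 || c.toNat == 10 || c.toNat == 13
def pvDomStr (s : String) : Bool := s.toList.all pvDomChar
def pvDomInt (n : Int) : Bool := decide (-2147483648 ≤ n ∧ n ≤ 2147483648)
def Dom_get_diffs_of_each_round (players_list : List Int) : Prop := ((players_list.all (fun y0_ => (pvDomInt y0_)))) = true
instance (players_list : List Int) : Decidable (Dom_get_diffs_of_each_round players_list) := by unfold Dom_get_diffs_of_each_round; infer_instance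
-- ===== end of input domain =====

-- B works on the list of adjacent differences: first diff + every diff preceded by a negative diff (simpler; no index table).

-- ===== PORT A =====
def get_indices_of_firsts (players_list : List Int) : List Int :=
  (PySem.List.pyRange 1 players_list.length 1).foldl
    (fun acc i =>
      if PySem.List.pyGetD players_list i 0 < PySem.List.pyGetD players_list (i - 1) 0 then
        acc ++ [i]
      else acc)
    [0]

-- the comprehension 'for i in range(len(firsts_indices))' reading firsts_indices[i]
-- is transliterated as a fold over firsts_indices itself (same elements, same order)
def get_diffs_of_each_round (players_list : List Int) : List Int :=
  let firsts_indices := get_indices_of_firsts players_list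
  firsts_indices.foldl
    (fun acc j =>
      if j + 1 < (players_list.length : Int) then
        acc ++ [PySem.List.pyGetD players_list (j + 1) 0 - PySem.List.pyGetD players_list j 0]
      else acc)
    []

-- ===== PORT B =====
-- zip(l, l[1:]) → l.zip (l.drop 1); diffs[:1] → take 1; the filtering
-- comprehension over zip(diffs, diffs[1:]) → filterMap over the zipped pairs
def get_diffs_of_each_round_alt (players_list : List Int) : List Int :=
  let diffs := (players_list.zip (players_list.drop 1)).map (fun p => p.2 - p.1)
  diffs.take 1 ++
    (diffs.zip (diffs.drop 1)).filterMap (fun p => if p.1 < 0 then some p.2 else none)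

-- ===== PRECONDITION & SPEC =====
def Spec_get_diffs_of_each_round (players_list : List Int) (out : List Int) : Prop := out = get_diffs_of_each_round_alt players_list
instance (players_list : List Int) (out : List Int) : Decidable (Spec_get_diffs_of_each_round players_list out) := by unfold Spec_get_diffs_of_each_round; infer_instance

-- ===== CLAIM (what is proved, stated in full; the proofs are below) =====
def Claim_equal_get_diffs_of_each_round : Prop := ∀ (players_list : List Int), Dom_get_diffs_of_each_round players_list → Spec_get_diffs_of_each_round players_list (get_diffs_of_each_round players_list)

-- ===== LEMMAS AND PROOFS =====

-- proof helper: structural description of A's emission over descents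
def altGo (prev : Option Int) (l : List Int) : List Int :=
  match l with
  | [] => []
  | v :: rest =>
    (if (match prev with | none => true | some p => decide (v < p)) = true then
       (match rest with | [] => ([] : List Int) | nxt :: _ => [nxt - v])
     else []) ++ altGo (some v) rest

-- structural version of the descent indices collected by get_indices_of_firsts
def pvD (prev : Int) : List Int → Nat → List Int
  | [], _ => []
  | v :: rest, s => (if v < prev then [((s : Nat) : Int)] else []) ++ pvD v rest (s + 1)

theorem pv_getD_of_drop {pl l : List Int} {s : Nat} {v : Int} (h : pl.drop s = v :: l) :
    pl.getD s 0 = v := by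
  have h0 : (pl.drop s)[0]? = some v := by rw [h]; rfl
  rw [List.getElem?_drop] at h0
  simp only [Nat.add_zero] at h0
  simp [List.getD, h0]

theorem pv_firsts_bridge (l : List Int) : ∀ (pl : List Int) (s : Nat) (prev : Int)
    (acc : List Int), pl.drop s = l → 1 ≤ s → pl.getD (s - 1) 0 = prev →
    ((PySem.List.pyRange s pl.length 1).foldl
      (fun acc i =>
        if PySem.List.pyGetD pl i 0 < PySem.List.pyGetD pl (i - 1) 0 then acc ++ [i]
        else acc) acc)
    = acc ++ pvD prev l s := by
  induction l with
  | nil =>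
    intro pl s prev acc hdrop hs hprev
    have hlen : pl.length ≤ s := by
      by_contra hlt
      have := List.drop_eq_nil_iff.mp hdrop
      omega
    rw [PySem.List.pyRange_one_eq_nil (by exact_mod_cast hlen)]
    simp [pvD]
  | cons v rest ih =>
    intro pl s prev acc hdrop hs hprev
    have hslen : s < pl.length := by
      by_contra hge
      rw [List.drop_eq_nil_iff.mpr (by omega)] at hdrop
      exact List.cons_ne_nil v rest hdrop.symm
    rw [PySem.List.pyRange_one_cons (by exact_mod_cast hslen)]
    have hv : pl.getD s 0 = v := pv_getD_of_drop hdrop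
    have hgv : PySem.List.pyGetD pl (s : Int) 0 = v := by
      rw [PySem.List.pyGetD_natCast]; exact hv
    have hgp : PySem.List.pyGetD pl ((s : Int) - 1) 0 = prev := by
      have : ((s : Int) - 1) = ((s - 1 : Nat) : Int) := by omega
      rw [this, PySem.List.pyGetD_natCast]; exact hprev
    have hdrop' : pl.drop (s + 1) = rest := by
      rw [← List.drop_drop, hdrop]; rfl
    have hprev' : pl.getD (s + 1 - 1) 0 = v := by simpa using hv
    rw [List.foldl_cons]
    rw [show ((s : Int) + 1) = ((s + 1 : Nat) : Int) by push_cast; ring]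
    rw [ih pl (s + 1) v _ (by exact_mod_cast hdrop') (by omega) hprev']
    simp only [hgv, hgp, pvD]
    by_cases hlt : v < prev
    · simp [hlt]
    · simp [hlt]

theorem pv_firsts_eq (x : Int) (l : List Int) :
    get_indices_of_firsts (x :: l) = 0 :: pvD x l 1 := by
  unfold get_indices_of_firsts
  have h := pv_firsts_bridge l (x :: l) 1 x [0] rfl (by omega) (by rfl)
  simp only [Nat.cast_one] at h
  rw [h]
  rfl

theorem pv_emit_bridge (l : List Int) : ∀ (pl : List Int) (s : Nat) (prev : Int)
    (acc : List Int), pl.drop s = l →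
    ((pvD prev l s).foldl
      (fun acc j =>
        if j + 1 < (pl.length : Int) then
          acc ++ [PySem.List.pyGetD pl (j + 1) 0 - PySem.List.pyGetD pl j 0]
        else acc) acc)
    = acc ++ altGo (some prev) l := by
  induction l with
  | nil => intro pl s prev acc hdrop; simp [pvD, altGo]
  | cons v rest ih =>
    intro pl s prev acc hdrop
    have hslen : s < pl.length := by
      by_contra hge
      rw [List.drop_eq_nil_iff.mpr (by omega)] at hdrop
      exact List.cons_ne_nil v rest hdrop.symm
    have hv : PySem.List.pyGetD pl (s : Int) 0 = v := by
      rw [PySem.List.pyGetD_natCast]; exact pv_getD_of_drop hdrop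
    have hdrop' : pl.drop (s + 1) = rest := by
      rw [← List.drop_drop, hdrop]; rfl
    simp only [pvD, altGo]
    by_cases hlt : v < prev
    · simp only [if_pos hlt, List.cons_append, List.nil_append, List.foldl_cons]
      have hrec := ih pl (s + 1) v
      cases rest with
      | nil =>
        have hlen : pl.length = s + 1 := by
          have := List.drop_eq_nil_iff.mp hdrop'
          omega
        have hguard : ¬ ((s : Int) + 1 < (pl.length : Int)) := by
          rw [hlen]; push_cast; omega
        rw [if_neg hguard]
        rw [hrec acc (by exact_mod_cast hdrop')]
        simp [hlt]
      | cons nxt rest' =>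
        have hguard : (s : Int) + 1 < (pl.length : Int) := by
          have : s + 1 < pl.length := by
            by_contra hge
            rw [List.drop_eq_nil_iff.mpr (by omega)] at hdrop'
            exact List.cons_ne_nil nxt rest' hdrop'.symm
          exact_mod_cast this
        rw [if_pos hguard]
        have hnxt : PySem.List.pyGetD pl ((s : Int) + 1) 0 = nxt := by
          have hcast : ((s : Int) + 1) = ((s + 1 : Nat) : Int) := by push_cast; ring
          rw [hcast, PySem.List.pyGetD_natCast]
          exact pv_getD_of_drop hdrop'
        rw [hnxt, hv]
        rw [hrec (acc ++ [nxt - v]) (by exact_mod_cast hdrop')]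
        simp [hlt]
    · simp only [if_neg hlt, List.nil_append]
      rw [ih pl (s + 1) v acc (by exact_mod_cast hdrop')]
      simp [hlt]

-- the diff list B builds, as a function (definitionally B's 'diffs')
def pvDiffs (pl : List Int) : List Int :=
  (pl.zip (pl.drop 1)).map (fun p => p.2 - p.1)

theorem pvDiffs_cons_cons (a b : Int) (t : List Int) :
    pvDiffs (a :: b :: t) = (b - a) :: pvDiffs (b :: t) := by
  simp [pvDiffs]

-- altGo's emissions over l with predecessor prev = B's filter over the diffs of prev::l
theorem altGo_some_cons2 (p v n : Int) (t : List Int) :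
    altGo (some p) (v :: n :: t) = (if v < p then [n - v] else []) ++ altGo (some v) (n :: t) := by
  conv_lhs => rw [altGo]
  by_cases h : v < p <;> simp [h]

theorem pv_alt_eq_filter (l : List Int) : ∀ (prev : Int),
    altGo (some prev) l =
      ((pvDiffs (prev :: l)).zip ((pvDiffs (prev :: l)).drop 1)).filterMap
        (fun p => if p.1 < 0 then some p.2 else none) := by
  induction l with
  | nil => intro prev; simp [altGo, pvDiffs]
  | cons v rest ih =>
    intro prev
    rw [pvDiffs_cons_cons]
    cases rest with
    | nil =>
      simp [altGo, pvDiffs]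
    | cons nxt rest' =>
      rw [pvDiffs_cons_cons, altGo_some_cons2]
      simp only [List.drop_succ_cons, List.drop_zero, List.zip_cons_cons,
        List.filterMap_cons]
      rw [ih v, pvDiffs_cons_cons]
      by_cases hlt : v < prev
      · rw [if_pos hlt, if_pos (by omega : v - prev < 0)]
        simp
      · rw [if_neg hlt, if_neg (by omega : ¬ (v - prev < 0))]
        simp

-- ===== VERDICT (by name: the statement is the Claim_ definition above) =====
theorem get_diffs_of_each_round_spec : Claim_equal_get_diffs_of_each_round := by
  intro pl _
  unfold Spec_get_diffs_of_each_round get_diffs_of_each_round get_diffs_of_each_round_alt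
  cases pl with
  | nil => rfl
  | cons x l =>
    rw [pv_firsts_eq x l]
    simp only [List.foldl_cons]
    have h0 : PySem.List.pyGetD (x :: l) (0 : Int) 0 = x := by
      rw [PySem.List.pyGetD_zero_cons]
    cases l with
    | nil =>
      have : ¬ ((0 : Int) + 1 < (([x] : List Int).length : Int)) := by simp
      rw [if_neg this]
      simp [pvD, altGo, pvDiffs]
    | cons nxt rest =>
      have hguard : (0 : Int) + 1 < (((x :: nxt :: rest) : List Int).length : Int) := by
        simp
      rw [if_pos hguard]
      have h1 : PySem.List.pyGetD (x :: nxt :: rest) ((0 : Int) + 1) 0 = nxt := by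
        have : ((0 : Int) + 1) = ((1 : Nat) : Int) := by norm_num
        rw [this, PySem.List.pyGetD_natCast]; rfl
      rw [h1, h0]
      rw [pv_emit_bridge (nxt :: rest) (x :: nxt :: rest) 1 x _ rfl]
      rw [pv_alt_eq_filter (nxt :: rest) x]
      show [nxt - x] ++ _ = _
      rw [pvDiffs_cons_cons]
      simp [pvDiffs]
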